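-- pv_equiv track=rewrite | github.com/charlie-hagelskamp/MLB_WildCard | data_generator.py | _add_wildcard_status
-- ===== SOURCE A (Python) =====
-- def _add_wildcard_status(teams):
--     """Add wild card status to teams"""
--     for i, team in enumerate(teams):
--         if i < 3:  # Division winners (assuming top 3)
--             team['status'] = f'Division Leader'
--         elif i < 6:  # Wild card spots
--             team['status'] = f'WC{i-2}'
--         else:
--             team['status'] = 'Contender'
--     return teams
-- ===== SOURCE B (Python) =====
-- def _add_wildcard_status(teams):
--     """Add wild card status to teams"""
--     for team in teams[:3]:
--         team['status'] = 'Division Leader'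
--     for j, team in enumerate(teams[3:6], start=1):
--         team['status'] = f'WC{j}'
--     for team in teams[6:]:
--         team['status'] = 'Contender'
--     return teams
-- ===== Notes on version B (the rewrite author's own statement) =====
-- stated objective: simpler
-- what changed: Instead of one indexed loop with i<3/i<6 conditionals, B partitions the list into teams[:3], teams[3:6], teams[6:] and runs three branch-free passes, so no per-element conditional remains.
import Mathlib
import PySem

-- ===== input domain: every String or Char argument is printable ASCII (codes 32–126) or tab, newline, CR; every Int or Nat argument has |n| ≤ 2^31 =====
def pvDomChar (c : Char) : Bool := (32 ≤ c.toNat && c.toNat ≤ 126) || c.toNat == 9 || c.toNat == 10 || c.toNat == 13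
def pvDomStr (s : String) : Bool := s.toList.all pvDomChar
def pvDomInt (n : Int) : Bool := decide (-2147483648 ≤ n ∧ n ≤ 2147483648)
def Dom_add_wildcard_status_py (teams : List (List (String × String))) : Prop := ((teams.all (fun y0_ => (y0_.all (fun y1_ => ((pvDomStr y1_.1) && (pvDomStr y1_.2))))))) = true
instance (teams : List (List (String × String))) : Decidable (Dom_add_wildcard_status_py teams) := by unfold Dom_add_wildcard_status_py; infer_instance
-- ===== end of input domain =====

-- B replaces the single indexed loop with if-branches by three branch-free passes over
-- teams[:3], teams[3:6], teams[6:] (simpler decomposition; same cost). Both versions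
-- mutate the team dicts in place in Python; the theorem is about the returned value,
-- which for both equals the full updated list.

-- dict assignment d['status'] = v on an association list: overwrite the first matching
-- key in place, otherwise append (Python dict __setitem__); shared primitive of both ports
def pySetItem (d : List (String × String)) (k v : String) : List (String × String) :=
  match d with
  | [] => [(k, v)]
  | (k', v') :: rest => if k' = k then (k, v) :: rest else (k', v') :: pySetItem rest k v

-- ===== PORT A =====
def add_wildcard_status_py (teams : List (List (String × String))) : List (List (String × String)) :=
  (PySem.List.enumerate teams 0).map (fun p =>
    if p.1 < 3 then pySetItem p.2 "status" "Division Leader"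
    else if p.1 < 6 then pySetItem p.2 "status" ("WC" ++ PySem.Int.toStr (p.1 - 2))
    else pySetItem p.2 "status" "Contender")

-- ===== PORT B =====
-- teams[:3], teams[3:6], teams[6:] with nonnegative bounds are take/drop
def add_wildcard_status_py_alt (teams : List (List (String × String))) : List (List (String × String)) :=
  (teams.take 3).map (fun t => pySetItem t "status" "Division Leader")
  ++ (PySem.List.enumerate ((teams.drop 3).take 3) 1).map
       (fun p => pySetItem p.2 "status" ("WC" ++ PySem.Int.toStr p.1))
  ++ (teams.drop 6).map (fun t => pySetItem t "status" "Contender")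

-- ===== PRECONDITION & SPEC =====
def Spec_add_wildcard_status_py (teams : List (List (String × String))) (out : List (List (String × String))) : Prop := out = add_wildcard_status_py_alt teams
instance (teams : List (List (String × String))) (out : List (List (String × String))) : Decidable (Spec_add_wildcard_status_py teams out) := by unfold Spec_add_wildcard_status_py; infer_instance

-- ===== CLAIM (what is proved, stated in full; the proofs are below) =====
def Claim_equal_add_wildcard_status_py : Prop := ∀ (teams : List (List (String × String))), Dom_add_wildcard_status_py teams → Spec_add_wildcard_status_py teams (add_wildcard_status_py teams)

-- ===== LEMMAS AND PROOFS =====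

-- past index 6 every element of A's enumerate-map gets 'Contender'
theorem enumMap_contender (l : List (List (String × String))) (n : Int) (hn : 6 ≤ n) :
    (PySem.List.enumerate l n).map (fun p =>
      if p.1 < 3 then pySetItem p.2 "status" "Division Leader"
      else if p.1 < 6 then pySetItem p.2 "status" ("WC" ++ PySem.Int.toStr (p.1 - 2))
      else pySetItem p.2 "status" "Contender")
    = l.map (fun t => pySetItem t "status" "Contender") := by
  induction l generalizing n with
  | nil => simp [PySem.List.enumerate_nil]
  | cons a tl ih =>
    rw [PySem.List.enumerate_cons]
    simp only [List.map_cons]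
    rw [ih (n + 1) (by omega)]
    have h1 : ¬ n < 3 := by omega
    have h2 : ¬ n < 6 := by omega
    simp [h1, h2]

theorem add_wildcard_eq (teams : List (List (String × String))) :
    add_wildcard_status_py teams = add_wildcard_status_py_alt teams := by
  unfold add_wildcard_status_py add_wildcard_status_py_alt
  obtain _ | ⟨a, _ | ⟨b, _ | ⟨c, _ | ⟨d, _ | ⟨e, _ | ⟨f, tl⟩⟩⟩⟩⟩⟩ := teams <;>
    simp only [PySem.List.enumerate_nil, PySem.List.enumerate_cons, List.map_cons,
      List.map_nil, List.take, List.drop, List.nil_append, List.cons_append,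
      List.append_nil] <;>
    norm_num
  exact enumMap_contender tl 6 (by norm_num)

-- ===== VERDICT (by name: the statement is the Claim_ definition above) =====
theorem add_wildcard_status_py_spec : Claim_equal_add_wildcard_status_py := by
  intro teams _
  unfold Spec_add_wildcard_status_py
  exact add_wildcard_eq teams
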